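-- pv_equiv track=rewrite | github.com/EswarbabuEttaligalla/UIDAI-hackathon | backend/app/alert_manager.py | _determine_alert_type
-- ===== SOURCE A (Python) =====
-- from typing import List, Dict, Optional
--
-- def _determine_alert_type(factors: List[Dict]) -> str:
--     """Determine alert type based on contributing factors"""
--     rule_names = [f["rule_name"] for f in factors]
--
--     if "HIGH_AUTH_FREQUENCY" in rule_names:
--         return "VELOCITY_ATTACK"
--     elif "GEOGRAPHIC_VELOCITY_ANOMALY" in rule_names:
--         return "GEOGRAPHIC_ANOMALY"
--     elif "OTP_FALLBACK_ABUSE" in rule_names or "HIGH_FAILURE_RATE" in rule_names: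
--         return "BIOMETRIC_FAILURE_SPIKE"
--     elif "OFF_HOURS_ACTIVITY" in rule_names:
--         return "OFF_HOURS_SPIKE"
--     else:
--         return "VELOCITY_ATTACK"
-- ===== SOURCE B (Python) =====
-- from typing import List, Dict, Optional
--
-- PRIORITY = {
--     "HIGH_AUTH_FREQUENCY": (0, "VELOCITY_ATTACK"),
--     "GEOGRAPHIC_VELOCITY_ANOMALY": (1, "GEOGRAPHIC_ANOMALY"),
--     "OTP_FALLBACK_ABUSE": (2, "BIOMETRIC_FAILURE_SPIKE"),
--     "HIGH_FAILURE_RATE": (2, "BIOMETRIC_FAILURE_SPIKE"),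
--     "OFF_HOURS_ACTIVITY": (3, "OFF_HOURS_SPIKE"),
-- }
--
-- def _determine_alert_type(factors: List[Dict]) -> str:
--     """Determine alert type: lookup-table + min-priority scan."""
--     rule_names = [f["rule_name"] for f in factors]
--     best = None
--     for name in rule_names:
--         entry = PRIORITY.get(name)
--         if entry is not None and (best is None or entry[0] < best[0]):
--             best = entry
--     return best[1] if best is not None else "VELOCITY_ATTACK"
-- ===== Notes on version B (the rewrite author's own statement) =====
-- stated objective: alternative
-- what changed: Replaces the priority-ordered if/elif membership chain (up to five scans of the rule-name list) with a static priority table and a single min-priority scan over the rule names.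
import Mathlib
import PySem

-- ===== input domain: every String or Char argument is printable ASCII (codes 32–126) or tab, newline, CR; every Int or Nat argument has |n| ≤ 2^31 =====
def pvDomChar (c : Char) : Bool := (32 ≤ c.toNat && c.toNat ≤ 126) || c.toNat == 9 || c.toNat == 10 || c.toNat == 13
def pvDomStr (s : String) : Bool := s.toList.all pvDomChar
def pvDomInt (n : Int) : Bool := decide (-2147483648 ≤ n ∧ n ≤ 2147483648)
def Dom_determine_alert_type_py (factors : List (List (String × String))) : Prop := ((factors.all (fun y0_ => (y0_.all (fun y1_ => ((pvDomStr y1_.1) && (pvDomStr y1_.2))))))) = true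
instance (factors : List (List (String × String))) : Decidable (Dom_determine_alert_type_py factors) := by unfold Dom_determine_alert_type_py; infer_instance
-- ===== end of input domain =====

-- B replaces A's priority-ordered if/elif membership chain by a static priority table and a
-- single min-priority scan of the rule names; return values agree on every input where A returns.

-- ===== PORT A =====
def determine_alert_type_py (factors : List (List (String × String))) : String :=
  let rule_names := factors.map (fun f => ((PySem.Dict.ofList f).get? "rule_name").getD "")
  if rule_names.contains "HIGH_AUTH_FREQUENCY" then "VELOCITY_ATTACK"
  else if rule_names.contains "GEOGRAPHIC_VELOCITY_ANOMALY" then "GEOGRAPHIC_ANOMALY"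
  else if rule_names.contains "OTP_FALLBACK_ABUSE" || rule_names.contains "HIGH_FAILURE_RATE" then
    "BIOMETRIC_FAILURE_SPIKE"
  else if rule_names.contains "OFF_HOURS_ACTIVITY" then "OFF_HOURS_SPIKE"
  else "VELOCITY_ATTACK"

-- ===== PORT B =====
def pvPriority : PySem.Dict String (Int × String) :=
  PySem.Dict.ofList
    [("HIGH_AUTH_FREQUENCY", (0, "VELOCITY_ATTACK")),
     ("GEOGRAPHIC_VELOCITY_ANOMALY", (1, "GEOGRAPHIC_ANOMALY")),
     ("OTP_FALLBACK_ABUSE", (2, "BIOMETRIC_FAILURE_SPIKE")),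
     ("HIGH_FAILURE_RATE", (2, "BIOMETRIC_FAILURE_SPIKE")),
     ("OFF_HOURS_ACTIVITY", (3, "OFF_HOURS_SPIKE"))]

def pvStep (best : Option (Int × String)) (name : String) : Option (Int × String) :=
  match pvPriority.get? name with
  | none => best
  | some entry =>
    match best with
    | none => some entry
    | some b => if entry.1 < b.1 then some entry else best

def determine_alert_type_py_alt (factors : List (List (String × String))) : String :=
  let rule_names := factors.map (fun f => ((PySem.Dict.ofList f).get? "rule_name").getD "")
  let best := rule_names.foldl pvStep none
  match best with
  | some b => b.2
  | none => "VELOCITY_ATTACK"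

-- ===== PRECONDITION & SPEC =====
-- Pre_ excludes exactly the inputs where Python A raises KeyError: a factor dict without key
-- "rule_name" (B raises there as well).
def Pre_determine_alert_type_py (factors : List (List (String × String))) : Prop :=
  factors.all (fun f => ((PySem.Dict.ofList f).get? "rule_name").isSome) = true
instance (factors : List (List (String × String))) : Decidable (Pre_determine_alert_type_py factors) := by unfold Pre_determine_alert_type_py; infer_instance
def pvWitness_determine_alert_type_py : (List (List (String × String))) :=
  [[("rule_name", "OFF_HOURS_ACTIVITY")], [("rule_name", "HIGH_FAILURE_RATE")]]

def Spec_determine_alert_type_py (factors : List (List (String × String))) (out : String) : Prop := out = determine_alert_type_py_alt factors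
instance (factors : List (List (String × String))) (out : String) : Decidable (Spec_determine_alert_type_py factors out) := by unfold Spec_determine_alert_type_py; infer_instance

-- ===== CLAIM (what is proved, stated in full; the proofs are below) =====
def Claim_equal_determine_alert_type_py : Prop := ∀ (factors : List (List (String × String))), Dom_determine_alert_type_py factors → Pre_determine_alert_type_py factors → Spec_determine_alert_type_py factors (determine_alert_type_py factors)

-- ===== LEMMAS AND PROOFS =====

-- rank of a rule name in the priority table (4 = not in the table)
def rankOf (n : String) : Nat :=
  if n = "HIGH_AUTH_FREQUENCY" then 0
  else if n = "GEOGRAPHIC_VELOCITY_ANOMALY" then 1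
  else if n = "OTP_FALLBACK_ABUSE" then 2
  else if n = "HIGH_FAILURE_RATE" then 2
  else if n = "OFF_HOURS_ACTIVITY" then 3
  else 4

def minRank (ns : List String) : Nat := ns.foldr (fun n acc => min (rankOf n) acc) 4

def strOf (r : Nat) : String :=
  if r = 1 then "GEOGRAPHIC_ANOMALY"
  else if r = 2 then "BIOMETRIC_FAILURE_SPIKE"
  else if r = 3 then "OFF_HOURS_SPIKE"
  else "VELOCITY_ATTACK"

def ofRank (r : Nat) : Option (Int × String) :=
  if r = 4 then none else some ((r : Int), strOf r)

theorem minRank_le_four (ns : List String) : minRank ns ≤ 4 := by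
  induction ns with
  | nil => simp [minRank]
  | cons n t ih => simpa [minRank] using Or.inr ih

theorem minRank_cons (n : String) (t : List String) :
    minRank (n :: t) = min (rankOf n) (minRank t) := rfl

theorem pvStep_ofRank (r : Nat) (hr : r ≤ 4) (n : String) :
    pvStep (ofRank r) n = ofRank (min r (rankOf n)) := by
  by_cases h0 : n = "HIGH_AUTH_FREQUENCY"
  · subst h0; interval_cases r <;> decide
  · by_cases h1 : n = "GEOGRAPHIC_VELOCITY_ANOMALY"
    · subst h1; interval_cases r <;> decide
    · by_cases h2 : n = "OTP_FALLBACK_ABUSE"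
      · subst h2; interval_cases r <;> decide
      · by_cases h3 : n = "HIGH_FAILURE_RATE"
        · subst h3; interval_cases r <;> decide
        · by_cases h4 : n = "OFF_HOURS_ACTIVITY"
          · subst h4; interval_cases r <;> decide
          · have hget : pvPriority.get? n = none := by
              have hP : pvPriority = PySem.Dict.mk
                  [("HIGH_AUTH_FREQUENCY", ((0 : Int), "VELOCITY_ATTACK")),
                   ("GEOGRAPHIC_VELOCITY_ANOMALY", (1, "GEOGRAPHIC_ANOMALY")),
                   ("OTP_FALLBACK_ABUSE", (2, "BIOMETRIC_FAILURE_SPIKE")),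
                   ("HIGH_FAILURE_RATE", (2, "BIOMETRIC_FAILURE_SPIKE")),
                   ("OFF_HOURS_ACTIVITY", (3, "OFF_HOURS_SPIKE"))] := by decide
              simp [hP, PySem.Dict.get?, beq_iff_eq,
                    Ne.symm h0, Ne.symm h1, Ne.symm h2, Ne.symm h3, Ne.symm h4]
            have hrank : rankOf n = 4 := by simp [rankOf, h0, h1, h2, h3, h4]
            simp [pvStep, hget, hrank, Nat.min_eq_left hr]

theorem foldl_pvStep (ns : List String) : ∀ r, r ≤ 4 →
    ns.foldl pvStep (ofRank r) = ofRank (min r (minRank ns)) := by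
  induction ns with
  | nil => intro r hr; simp [minRank, Nat.min_eq_left hr]
  | cons n t ih =>
    intro r hr
    rw [List.foldl_cons, pvStep_ofRank r hr n,
        ih _ (le_trans (Nat.min_le_left _ _) hr), minRank_cons, Nat.min_assoc]

theorem rankOf_eq_zero_iff (n : String) : rankOf n = 0 ↔ n = "HIGH_AUTH_FREQUENCY" := by
  unfold rankOf; split_ifs <;> simp_all

theorem rankOf_le_one_iff (n : String) :
    rankOf n ≤ 1 ↔ n = "HIGH_AUTH_FREQUENCY" ∨ n = "GEOGRAPHIC_VELOCITY_ANOMALY" := by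
  unfold rankOf; split_ifs <;> simp_all

theorem rankOf_le_two_iff (n : String) :
    rankOf n ≤ 2 ↔ n = "HIGH_AUTH_FREQUENCY" ∨ n = "GEOGRAPHIC_VELOCITY_ANOMALY" ∨
      n = "OTP_FALLBACK_ABUSE" ∨ n = "HIGH_FAILURE_RATE" := by
  unfold rankOf; split_ifs <;> simp_all

theorem rankOf_le_three_iff (n : String) :
    rankOf n ≤ 3 ↔ n = "HIGH_AUTH_FREQUENCY" ∨ n = "GEOGRAPHIC_VELOCITY_ANOMALY" ∨
      n = "OTP_FALLBACK_ABUSE" ∨ n = "HIGH_FAILURE_RATE" ∨ n = "OFF_HOURS_ACTIVITY" := by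
  unfold rankOf; split_ifs <;> simp_all

theorem minRank_le_iff (ns : List String) (r : Nat) (hr : r < 4) :
    minRank ns ≤ r ↔ ∃ n ∈ ns, rankOf n ≤ r := by
  induction ns with
  | nil => simp [minRank]; omega
  | cons n t ih => simp [minRank_cons, ih]

theorem chain_eq_strOf (ns : List String) :
    (if ns.contains "HIGH_AUTH_FREQUENCY" then "VELOCITY_ATTACK"
     else if ns.contains "GEOGRAPHIC_VELOCITY_ANOMALY" then "GEOGRAPHIC_ANOMALY"
     else if ns.contains "OTP_FALLBACK_ABUSE" || ns.contains "HIGH_FAILURE_RATE" then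
       "BIOMETRIC_FAILURE_SPIKE"
     else if ns.contains "OFF_HOURS_ACTIVITY" then "OFF_HOURS_SPIKE"
     else "VELOCITY_ATTACK") = strOf (minRank ns) := by
  have h4 := minRank_le_four ns
  by_cases hA : "HIGH_AUTH_FREQUENCY" ∈ ns
  · have hm : minRank ns = 0 :=
      Nat.le_zero.mp ((minRank_le_iff ns 0 (by omega)).2 ⟨_, hA, by decide⟩)
    simp [hA, hm, strOf]
  · have h0 : ¬ minRank ns ≤ 0 := fun h => by
      obtain ⟨n, hn, hr⟩ := (minRank_le_iff ns 0 (by omega)).1 h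
      exact hA (((rankOf_eq_zero_iff n).1 (Nat.le_zero.mp hr)) ▸ hn)
    by_cases hG : "GEOGRAPHIC_VELOCITY_ANOMALY" ∈ ns
    · have hm : minRank ns = 1 := by
        have := (minRank_le_iff ns 1 (by omega)).2 ⟨_, hG, by decide⟩
        omega
      simp [hA, hG, hm, strOf]
    · have h1 : ¬ minRank ns ≤ 1 := fun h => by
        obtain ⟨n, hn, hr⟩ := (minRank_le_iff ns 1 (by omega)).1 h
        rcases (rankOf_le_one_iff n).1 hr with h | h
        · exact hA (h ▸ hn)
        · exact hG (h ▸ hn)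
      by_cases hO : "OTP_FALLBACK_ABUSE" ∈ ns
      · have hm : minRank ns = 2 := by
          have := (minRank_le_iff ns 2 (by omega)).2 ⟨_, hO, by decide⟩
          omega
        simp [hA, hG, hO, hm, strOf]
      · by_cases hF : "HIGH_FAILURE_RATE" ∈ ns
        · have hm : minRank ns = 2 := by
            have := (minRank_le_iff ns 2 (by omega)).2 ⟨_, hF, by decide⟩
            omega
          simp [hA, hG, hO, hF, hm, strOf]
        · have h2 : ¬ minRank ns ≤ 2 := fun h => by
            obtain ⟨n, hn, hr⟩ := (minRank_le_iff ns 2 (by omega)).1 h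
            rcases (rankOf_le_two_iff n).1 hr with h | h | h | h
            · exact hA (h ▸ hn)
            · exact hG (h ▸ hn)
            · exact hO (h ▸ hn)
            · exact hF (h ▸ hn)
          by_cases hH : "OFF_HOURS_ACTIVITY" ∈ ns
          · have hm : minRank ns = 3 := by
              have := (minRank_le_iff ns 3 (by omega)).2 ⟨_, hH, by decide⟩
              omega
            simp [hA, hG, hO, hF, hH, hm, strOf]
          · have h3 : ¬ minRank ns ≤ 3 := fun h => by
              obtain ⟨n, hn, hr⟩ := (minRank_le_iff ns 3 (by omega)).1 h
              rcases (rankOf_le_three_iff n).1 hr with h | h | h | h | h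
              · exact hA (h ▸ hn)
              · exact hG (h ▸ hn)
              · exact hO (h ▸ hn)
              · exact hF (h ▸ hn)
              · exact hH (h ▸ hn)
            have hm : minRank ns = 4 := by omega
            simp [hA, hG, hO, hF, hH, hm, strOf]

-- ===== VERDICT (by name: the statement is the Claim_ definition above) =====
theorem determine_alert_type_py_spec : Claim_equal_determine_alert_type_py := by
  intro factors _ _
  unfold Spec_determine_alert_type_py determine_alert_type_py determine_alert_type_py_alt
  have h4 : minRank (factors.map (fun f => ((PySem.Dict.ofList f).get? "rule_name").getD "")) ≤ 4 :=
    minRank_le_four _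
  rw [chain_eq_strOf]
  have hfold := foldl_pvStep (factors.map (fun f => ((PySem.Dict.ofList f).get? "rule_name").getD "")) 4 le_rfl
  simp only [Nat.min_eq_right h4] at hfold
  show _ = (match List.foldl pvStep none
      (factors.map (fun f => ((PySem.Dict.ofList f).get? "rule_name").getD "")) with
    | some b => b.2
    | none => "VELOCITY_ATTACK")
  rw [show (none : Option (Int × String)) = ofRank 4 from rfl, hfold]
  set r := minRank (factors.map (fun f => ((PySem.Dict.ofList f).get? "rule_name").getD "")) with hr
  clear_value r
  interval_cases r <;> rfl
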